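-- pv_equiv track=rewrite | github.com/aajanki/eduskunta-vkk | cleanup_vkk.py | remove_headers
-- ===== SOURCE A (Python) =====
-- def remove_headers(lines, header):
--     while True:
--         try:
--             i = lines.index(header)
--         except ValueError:
--             break
--
--         first = i-1
--         while first >= 0 and not lines[first]:
--             first -= 1
--
--         last = i+1
--         while last < len(lines) and not lines[last]:
--             last += 1
--
--         lines = lines[:(first+1)] + lines[last:]
--
--     return lines
-- ===== SOURCE B (Python) =====
-- def remove_headers(lines, header):
--     out = []
--     pending = []   # buffered blank lines not yet known to survive
--     drop = False   # currently inside a blank run adjacent to a removed header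
--     for ln in lines:
--         if ln == header:
--             pending = []
--             drop = True
--         elif not ln:
--             if not drop:
--                 pending.append(ln)
--         else:
--             out.extend(pending)
--             pending = []
--             drop = False
--             out.append(ln)
--     if not drop:
--         out.extend(pending)
--     return out
-- ===== Notes on version B (the rewrite author's own statement) =====
-- stated objective: alternative
-- what changed: Replaced the repeated index()+rescan+list-rebuild loop by a single left-to-right pass that buffers blank lines and drops a buffered/following blank run whenever the header is met, building the output once.
import Mathlib
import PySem

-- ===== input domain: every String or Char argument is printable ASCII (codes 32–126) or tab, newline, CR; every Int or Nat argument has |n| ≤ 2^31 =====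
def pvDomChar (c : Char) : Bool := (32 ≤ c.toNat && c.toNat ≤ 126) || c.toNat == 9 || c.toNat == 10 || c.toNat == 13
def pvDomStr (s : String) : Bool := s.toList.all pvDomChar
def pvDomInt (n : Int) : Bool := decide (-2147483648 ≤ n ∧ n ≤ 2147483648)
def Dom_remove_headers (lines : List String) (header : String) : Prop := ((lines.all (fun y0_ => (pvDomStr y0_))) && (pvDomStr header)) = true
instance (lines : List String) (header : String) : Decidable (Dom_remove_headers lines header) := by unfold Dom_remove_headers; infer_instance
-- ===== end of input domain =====

-- B is a single left-to-right pass with a blank-line buffer instead of A's repeated index()+rescan+rebuild loop; return values proved equal on all inputs.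

-- ===== PORT A =====
-- inner loop: while first >= 0 and not lines[first]: first -= 1
def rhScanFirst (lines : List String) (first : Int) : Int :=
  if h : 0 ≤ first ∧ PySem.List.pyGet? lines first = some "" then
    rhScanFirst lines (first - 1)
  else first
termination_by (first + 1).toNat
decreasing_by omega

-- inner loop: while last < len(lines) and not lines[last]: last += 1
def rhScanLast (lines : List String) (last : Int) : Int :=
  if h : last < (lines.length : Int) ∧ PySem.List.pyGet? lines last = some "" then
    rhScanLast lines (last + 1)
  else last
termination_by ((lines.length : Int) - last).toNat
decreasing_by omega

theorem rhScanFirst_le (lines : List String) (first : Int) : rhScanFirst lines first ≤ first := by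
  fun_induction rhScanFirst lines first with
  | case1 first h ih => omega
  | case2 first h => omega

theorem rhScanLast_ge (lines : List String) (last : Int) : last ≤ rhScanLast lines last := by
  fun_induction rhScanLast lines last with
  | case1 last h ih => omega
  | case2 last h => omega

theorem rhScanFirst_ge (lines : List String) (first : Int) (h : -1 ≤ first) :
    -1 ≤ rhScanFirst lines first := by
  fun_induction rhScanFirst lines first with
  | case1 first h ih => exact ih (by omega)
  | case2 first h => omega

-- outer loop: while True: try i = lines.index(header) … lines = lines[:first+1] + lines[last:]
def remove_headers (lines : List String) (header : String) : List String :=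
  match h : PySem.List.index? lines header with
  | none => lines
  | some i =>
    let first := rhScanFirst lines ((i : Int) - 1)
    let last := rhScanLast lines ((i : Int) + 1)
    remove_headers
      (PySem.List.slice lines none (some (first + 1)) ++
       PySem.List.slice lines (some last) none) header
termination_by lines.length
decreasing_by
  have hi := PySem.List.getElem_of_index?_eq_some h
  obtain ⟨hk, -, -⟩ := hi
  have h1 : first ≤ (i : Int) - 1 := rhScanFirst_le lines ((i : Int) - 1)
  have h2 : (i : Int) + 1 ≤ last := rhScanLast_ge lines ((i : Int) + 1)
  have hfge : -1 ≤ first := rhScanFirst_ge lines ((i : Int) - 1) (by omega)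
  have e1 : PySem.List.slice lines none (some (first + 1)) = lines.take (first + 1).toNat :=
    PySem.List.slice_to lines (by omega)
  have e2 : PySem.List.slice lines (some last) none = lines.drop last.toNat :=
    PySem.List.slice_from lines (by omega)
  rw [e1, e2]
  have := List.length_take_le (first + 1).toNat lines
  simp only [List.length_append, List.length_take, List.length_drop]
  omega

-- ===== PORT B =====
def rhStep (header : String) (s : List String × List String × Bool) (ln : String) :
    List String × List String × Bool :=
  let (out, pending, drop) := s
  if ln = header then (out, [], true)
  else if ln = "" then (if drop then (out, pending, drop) else (out, pending ++ [ln], false))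
  else (out ++ pending ++ [ln], [], false)

def remove_headers_alt (lines : List String) (header : String) : List String :=
  let s := lines.foldl (rhStep header) ([], [], false)
  if s.2.2 then s.1 else s.1 ++ s.2.1

-- ===== PRECONDITION & SPEC =====
def Spec_remove_headers (lines : List String) (header : String) (out : List String) : Prop := out = remove_headers_alt lines header
instance (lines : List String) (header : String) (out : List String) : Decidable (Spec_remove_headers lines header out) := by unfold Spec_remove_headers; infer_instance

-- ===== CLAIM (what is proved, stated in full; the proofs are below) =====
def Claim_equal_remove_headers : Prop := ∀ (lines : List String) (header : String), Dom_remove_headers lines header → Spec_remove_headers lines header (remove_headers lines header)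

-- ===== LEMMAS AND PROOFS =====

def rhFin (s : List String × List String × Bool) : List String :=
  if s.2.2 then s.1 else s.1 ++ s.2.1

theorem rhStep_header (header ln : String) (out p : List String) (d : Bool) (h : ln = header) :
    rhStep header (out, p, d) ln = (out, [], true) := by
  simp [rhStep, h]

theorem rhStep_blank_false (header ln : String) (out p : List String)
    (h1 : ln ≠ header) (h2 : ln = "") :
    rhStep header (out, p, false) ln = (out, p ++ [ln], false) := by
  subst h2; simp [rhStep, Ne.symm h1]

theorem rhStep_blank_true (header ln : String) (out p : List String)
    (h1 : ln ≠ header) (h2 : ln = "") :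
    rhStep header (out, p, true) ln = (out, p, true) := by
  subst h2; simp [rhStep, Ne.symm h1]

theorem rhStep_nonblank (header ln : String) (out p : List String) (d : Bool)
    (h1 : ln ≠ header) (h2 : ln ≠ "") :
    rhStep header (out, p, d) ln = (out ++ p ++ [ln], [], false) := by
  simp [rhStep, h1, h2]

theorem rhAlt_eq_fin (lines : List String) (header : String) :
    remove_headers_alt lines header = rhFin (lines.foldl (rhStep header) ([], [], false)) := rfl

-- no header present ⇒ B reconstructs the list
theorem rh_noheader (header : String) (ls : List String) (hnh : header ∉ ls) :
    ∀ out pending, rhFin (ls.foldl (rhStep header) (out, pending, false)) = out ++ pending ++ ls := by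
  induction ls with
  | nil => intro out pending; simp [rhFin]
  | cons x xs ih =>
    intro out pending
    have hx : x ≠ header := fun e => hnh (e ▸ List.mem_cons_self)
    have hxs : header ∉ xs := fun m => hnh (List.mem_cons_of_mem _ m)
    by_cases hb : x = ""
    · rw [List.foldl_cons, rhStep_blank_false header x out pending hx hb, ih hxs]
      subst hb; simp
    · rw [List.foldl_cons, rhStep_nonblank header x out pending false hx hb, ih hxs]
      simp

-- in drop mode, a run of blanks is skipped
theorem rh_skip (header : String) (b : List String) (hb : ∀ x ∈ b, x = "") (out : List String) :
    b.foldl (rhStep header) (out, [], true) = (out, [], true) := by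
  induction b with
  | nil => rfl
  | cons x xs ih =>
    have hx : x = "" := hb x List.mem_cons_self
    subst hx
    have hxs : ∀ x ∈ xs, x = "" := fun x m => hb x (List.mem_cons_of_mem _ m)
    by_cases hh : ("" : String) = header
    · rw [List.foldl_cons, rhStep_header header "" out [] true hh]
      exact ih hxs
    · rw [List.foldl_cons, rhStep_blank_true header "" out [] hh rfl]
      exact ih hxs

-- not in drop mode and header nonblank: blanks are buffered
theorem rh_pend (header : String) (hh : header ≠ "") (b : List String) (hb : ∀ x ∈ b, x = "") :
    ∀ out pending, b.foldl (rhStep header) (out, pending, false) = (out, pending ++ b, false) := by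
  induction b with
  | nil => intro out pending; simp
  | cons x xs ih =>
    intro out pending
    have hx : x = "" := hb x List.mem_cons_self
    subst hx
    have hxs : ∀ x ∈ xs, x = "" := fun x m => hb x (List.mem_cons_of_mem _ m)
    have hne : ("" : String) ≠ header := fun e => hh e.symm
    rw [List.foldl_cons, rhStep_blank_false header "" out pending hne rfl, ih hxs]
    simp

-- processing blanks ++ header ++ blanks from a clean state ends in (out, [], true)
theorem rh_segment (header : String) (b1 b2 : List String)
    (h1 : ∀ x ∈ b1, x = "") (h2 : ∀ x ∈ b2, x = "") (out : List String) :
    (b1 ++ header :: b2).foldl (rhStep header) (out, [], false) = (out, [], true) := by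
  by_cases hh : header = ""
  · subst hh
    have hall : ∀ x ∈ b1 ++ "" :: b2, x = "" := by
      intro x m
      rcases List.mem_append.mp m with m | m
      · exact h1 x m
      · rcases List.mem_cons.mp m with e | m
        · exact e
        · exact h2 x m
    cases b1 with
    | nil =>
      rw [List.nil_append, List.foldl_cons, rhStep_header "" "" out [] false rfl]
      exact rh_skip "" b2 h2 out
    | cons x xs =>
      have hx : x = "" := h1 x List.mem_cons_self
      subst hx
      rw [List.cons_append, List.foldl_cons, rhStep_header "" "" out [] false rfl]
      exact rh_skip "" (xs ++ "" :: b2) (fun y m => hall y (List.mem_cons_of_mem _ m)) out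
  · rw [List.foldl_append, rh_pend header hh b1 h1 out [], List.nil_append,
        List.foldl_cons, rhStep_header header header out b1 false rfl]
    exact rh_skip header b2 h2 out
-- after the segment the drop flag differs, but the final value does not, provided the
-- rest is empty or starts with a nonblank line
theorem rh_rest (header : String) (R : List String)
    (hR : R = [] ∨ ∃ x R', R = x :: R' ∧ x ≠ "") (out : List String) :
    rhFin (R.foldl (rhStep header) (out, [], true)) = rhFin (R.foldl (rhStep header) (out, [], false)) := by
  rcases hR with rfl | ⟨x, R', rfl, hx⟩
  · simp [rhFin]
  · by_cases hh : x = header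
    · rw [List.foldl_cons, List.foldl_cons, rhStep_header header x out [] true hh,
          rhStep_header header x out [] false hh]
    · rw [List.foldl_cons, List.foldl_cons, rhStep_nonblank header x out [] true hh hx,
          rhStep_nonblank header x out [] false hh hx]

-- the whole absorption: removing the segment does not change B's result
theorem rh_absorb (header : String) (P b1 b2 R : List String)
    (hP : P = [] ∨ ∃ P' x, P = P' ++ [x] ∧ x ≠ "" ∧ x ≠ header)
    (h1 : ∀ x ∈ b1, x = "") (h2 : ∀ x ∈ b2, x = "")
    (hR : R = [] ∨ ∃ x R', R = x :: R' ∧ x ≠ "") :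
    rhFin ((P ++ (b1 ++ header :: b2) ++ R).foldl (rhStep header) ([], [], false)) =
    rhFin ((P ++ R).foldl (rhStep header) ([], [], false)) := by
  obtain ⟨out, hout⟩ : ∃ out, P.foldl (rhStep header) ([], [], false) = (out, [], false) := by
    rcases hP with rfl | ⟨P', x, rfl, hx, hxh⟩
    · exact ⟨[], rfl⟩
    · rw [List.foldl_append]
      obtain ⟨o, p, d⟩ := P'.foldl (rhStep header) ([], [], false)
      exact ⟨o ++ p ++ [x], by rw [List.foldl_cons, List.foldl_nil, rhStep_nonblank header x o p d hxh hx]⟩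
  rw [List.foldl_append, List.foldl_append, hout, rh_segment header b1 b2 h1 h2 out,
      rh_rest header R hR out, List.foldl_append, hout]

-- elements of an extract are getElems
theorem rh_blank_extract (lines : List String) (a b : Nat)
    (hblank : ∀ j (hj : j < lines.length), a ≤ j → j < b → lines[j] = "") :
    ∀ x ∈ (lines.drop a).take (b - a), x = "" := by
  intro x hx
  obtain ⟨k, hk, hget⟩ := List.mem_iff_getElem.mp hx
  have hk1 : k < b - a := lt_of_lt_of_le hk (by simp [List.length_take])
  have hk2 : a + k < lines.length := by
    have := hk
    simp [List.length_take, List.length_drop] at this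
    omega
  rw [List.getElem_take, List.getElem_drop] at hget
  rw [← hget]
  exact hblank (a + k) hk2 (by omega) (by omega)

-- characterization of the downward scan
theorem rhScanFirst_spec (lines : List String) (start : Int) (hs : -1 ≤ start) :
    (rhScanFirst lines start = -1 ∨
      0 ≤ rhScanFirst lines start ∧
        PySem.List.pyGet? lines (rhScanFirst lines start) ≠ some "") ∧
    (∀ j : Int, rhScanFirst lines start < j → j ≤ start → PySem.List.pyGet? lines j = some "") := by
  fun_induction rhScanFirst lines start with
  | case1 first h ih =>
    obtain ⟨hih1, hih2⟩ := ih (by omega)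
    refine ⟨?_, ?_⟩
    · exact hih1
    · intro j hj1 hj2
      rcases lt_or_ge (j) first with hlt | hge
      · exact hih2 j hj1 (by omega)
      · have : j = first := by omega
        rw [this]; exact h.2
  | case2 first h =>
    refine ⟨?_, fun j h1 h2 => absurd h2 (by omega)⟩
    rcases le_or_gt 0 first with hp | hp
    · right
      refine ⟨hp, fun e => h ⟨hp, e⟩⟩
    · left
      omega

-- characterization of the upward scan
theorem rhScanLast_spec (lines : List String) (start : Int) (hs : start ≤ (lines.length : Int)) :
    ((rhScanLast lines start : Int) = lines.length ∨
      rhScanLast lines start < lines.length ∧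
        PySem.List.pyGet? lines (rhScanLast lines start) ≠ some "") ∧
    (∀ j : Int, start ≤ j → j < rhScanLast lines start → PySem.List.pyGet? lines j = some "") := by
  fun_induction rhScanLast lines start with
  | case1 last h ih =>
    obtain ⟨hih1, hih2⟩ := ih (by omega)
    refine ⟨?_, ?_⟩
    · exact hih1
    · intro j hj1 hj2
      rcases lt_or_ge last j with hlt | hge
      · exact hih2 j (by omega) hj2
      · have : j = last := by omega
        rw [this]; exact h.2
  | case2 last h =>
    refine ⟨?_, fun j h1 h2 => absurd h2 (by omega)⟩
    rcases lt_or_ge last (lines.length : Int) with hp | hp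
    · right
      refine ⟨hp, fun e => h ⟨hp, e⟩⟩
    · left
      omega

theorem rh_main (lines : List String) (header : String) :
    remove_headers lines header = remove_headers_alt lines header := by
  fun_induction remove_headers lines header with
  | case1 lines h =>
    rw [rhAlt_eq_fin]
    exact (rh_noheader header lines ((PySem.List.index?_eq_none_iff lines header).mp h) [] []).symm
  | case2 lines i hidx first last ih =>
    obtain ⟨hk, hival, hmin⟩ := PySem.List.getElem_of_index?_eq_some hidx
    have hfle : first ≤ (i : Int) - 1 := rhScanFirst_le lines ((i : Int) - 1)
    have hfge : -1 ≤ first := rhScanFirst_ge lines ((i : Int) - 1) (by omega)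
    have hlge : (i : Int) + 1 ≤ last := rhScanLast_ge lines ((i : Int) + 1)
    have F1 : first = -1 ∨ 0 ≤ first ∧ PySem.List.pyGet? lines first ≠ some "" :=
      (rhScanFirst_spec lines ((i : Int) - 1) (by omega)).1
    have F2 : ∀ j : Int, first < j → j ≤ (i : Int) - 1 → PySem.List.pyGet? lines j = some "" :=
      (rhScanFirst_spec lines ((i : Int) - 1) (by omega)).2
    have L1 : last = (lines.length : Int) ∨
        last < (lines.length : Int) ∧ PySem.List.pyGet? lines last ≠ some "" :=
      (rhScanLast_spec lines ((i : Int) + 1) (by omega)).1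
    have L2 : ∀ j : Int, (i : Int) + 1 ≤ j → j < last → PySem.List.pyGet? lines j = some "" :=
      (rhScanLast_spec lines ((i : Int) + 1) (by omega)).2
    have hlle : last ≤ (lines.length : Int) := by rcases L1 with e | ⟨lt, -⟩ <;> omega
    set p : Nat := (first + 1).toNat with hp
    set l : Nat := last.toNat with hl
    have hpi : (p : Int) = first + 1 := by omega
    have hli : (l : Int) = last := by omega
    have hple : p ≤ i := by omega
    have hlgei : i + 1 ≤ l := by omega
    have hllen : l ≤ lines.length := by omega
    have e1 : PySem.List.slice lines none (some (first + 1)) = lines.take p :=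
      PySem.List.slice_to lines (by omega)
    have e2 : PySem.List.slice lines (some last) none = lines.drop l :=
      PySem.List.slice_from lines (by omega)
    -- the blank run before the header
    have hb1 : ∀ x ∈ (lines.drop p).take (i - p), x = "" := by
      refine rh_blank_extract lines p i ?_
      intro j hj hj1 hj2
      have := F2 (j : Int) (by omega) (by omega)
      rw [PySem.List.pyGet?_natCast, List.getElem?_eq_getElem hj] at this
      exact Option.some.inj this
    -- the blank run after the header
    have hb2 : ∀ x ∈ (lines.drop (i + 1)).take (l - (i + 1)), x = "" := by
      refine rh_blank_extract lines (i + 1) l ?_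
      intro j hj hj1 hj2
      have := L2 (j : Int) (by omega) (by omega)
      rw [PySem.List.pyGet?_natCast, List.getElem?_eq_getElem hj] at this
      exact Option.some.inj this
    -- decomposition of lines around the removed segment
    have s12 : lines.drop p = (lines.drop p).take (i - p) ++ lines.drop i := by
      conv_lhs => rw [← List.take_append_drop (i - p) (lines.drop p)]
      rw [List.drop_drop, show p + (i - p) = i from by omega]
    have s3 : lines.drop i = header :: lines.drop (i + 1) := by
      rw [List.drop_eq_getElem_cons hk, hival]
    have s45 : lines.drop (i + 1) =
        (lines.drop (i + 1)).take (l - (i + 1)) ++ lines.drop l := by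
      conv_lhs => rw [← List.take_append_drop (l - (i + 1)) (lines.drop (i + 1))]
      rw [List.drop_drop, show (i + 1) + (l - (i + 1)) = l from by omega]
    have hdecomp : lines =
        lines.take p ++
          ((lines.drop p).take (i - p) ++ header :: (lines.drop (i + 1)).take (l - (i + 1))) ++
          lines.drop l := by
      conv_lhs => rw [← List.take_append_drop p lines, s12, s3, s45]
      simp
    -- the prefix is empty or ends with a nonblank non-header line
    have hP : lines.take p = [] ∨
        ∃ P' x, lines.take p = P' ++ [x] ∧ x ≠ "" ∧ x ≠ header := by
      rcases F1 with e | ⟨hnn, hne⟩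
      · left
        have : p = 0 := by omega
        rw [this, List.take_zero]
      · right
        have hfl : first.toNat < lines.length := by omega
        have hpn : p = first.toNat + 1 := by omega
        refine ⟨lines.take first.toNat, lines[first.toNat], ?_, ?_, ?_⟩
        · rw [hpn, List.take_add_one, List.getElem?_eq_getElem hfl]
          rfl
        · intro e
          apply hne
          rw [show first = ((first.toNat : Nat) : Int) from by omega,
              PySem.List.pyGet?_natCast, List.getElem?_eq_getElem hfl, e]
        · exact hmin first.toNat (by omega)
    -- the suffix is empty or starts with a nonblank line
    have hR : lines.drop l = [] ∨ ∃ x R', lines.drop l = x :: R' ∧ x ≠ "" := by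
      rcases L1 with e | ⟨hlt, hne⟩
      · left
        have : l = lines.length := by omega
        rw [this, List.drop_length]
      · right
        have hln : l < lines.length := by omega
        refine ⟨lines[l], lines.drop (l + 1), List.drop_eq_getElem_cons hln, ?_⟩
        intro e
        apply hne
        rw [← hli, PySem.List.pyGet?_natCast, List.getElem?_eq_getElem hln, e]
    rw [e1, e2] at ih ⊢
    rw [ih, rhAlt_eq_fin, rhAlt_eq_fin]
    conv_rhs => rw [hdecomp]
    exact (rh_absorb header (lines.take p) ((lines.drop p).take (i - p))
      ((lines.drop (i + 1)).take (l - (i + 1))) (lines.drop l) hP hb1 hb2 hR).symm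

-- ===== VERDICT (by name: the statement is the Claim_ definition above) =====
theorem remove_headers_spec : Claim_equal_remove_headers := by
  intro lines header _
  exact rh_main lines header
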